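-- pv_equiv track=rewrite | github.com/Zad-Walid/IEEE-ZSB-Technica1-Rookies-23 | Task-4/p6.py | find_k
-- ===== SOURCE A (Python) =====
-- k = 6174
--
-- def find_k(val, n = 0):
--     if val == k:
--         return n
--     string_val = str(val)
--     string_val = ((4 - len(string_val)) * "0" ) + string_val
--     asc_val = "".join(sorted(string_val))
--     dec_val = int(asc_val[::-1])
--     asc_val = int(asc_val)
--     value = dec_val - asc_val
--     return find_k(value,n+1)
-- ===== SOURCE B (Python) =====
-- k = 6174
--
-- def find_k(val, n=0):
--     count = 0
--     while val != k:
--         digits = sorted(str(val).zfill(4))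
--         small = int("".join(digits))
--         big = int("".join(reversed(digits)))
--         val = big - small
--         count += 1
--     return n + count
-- ===== Notes on version B (the rewrite author's own statement) =====
-- stated objective: idiomatic
-- what changed: The tail recursion with a default-argument accumulator is replaced by an explicit while-loop that counts the Kaprekar steps in a local variable and adds the offset n once at the end, with zero-padding via str.zfill and the descending number taken from the reversed digit list instead of a string slice.
import Mathlib
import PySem

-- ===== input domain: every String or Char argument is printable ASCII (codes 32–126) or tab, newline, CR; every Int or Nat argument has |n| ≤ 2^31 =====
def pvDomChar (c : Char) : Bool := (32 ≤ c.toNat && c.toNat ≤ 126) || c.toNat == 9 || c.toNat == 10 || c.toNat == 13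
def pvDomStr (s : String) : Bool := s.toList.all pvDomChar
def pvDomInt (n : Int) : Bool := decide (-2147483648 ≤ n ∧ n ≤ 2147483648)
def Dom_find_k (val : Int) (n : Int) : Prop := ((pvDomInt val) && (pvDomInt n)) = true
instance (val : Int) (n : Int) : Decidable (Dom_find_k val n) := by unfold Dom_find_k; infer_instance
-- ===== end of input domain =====

-- B replaces A's tail recursion with a default-argument accumulator by an explicit counting
-- while-loop (offset n added once at the end); same return value on every admitted input.

-- ===== PORT A =====
-- A's unbounded recursion is totalised by a fuel counter (100 ≫ 7, the most steps any
-- admitted input needs); the fuel-0 branch is a guard only, unreachable under Pre_find_k.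
def find_k_go : Nat → Int → Int → Int
  | 0, _, n => n
  | fuel + 1, val, n =>
    if val = 6174 then n
    else
      let string_val := PySem.Int.toChars val
      let string_val := List.replicate (4 - string_val.length) '0' ++ string_val
      let asc_chars := PySem.List.sorted string_val (fun c => c) false
      -- int(asc_val[::-1]) and int(asc_val): the ValueError (none) case only occurs outside Pre_find_k
      let dec_val := (PySem.Int.ofChars? ((PySem.List.slice? asc_chars none none (-1)).getD [])).getD 0
      let asc_val := (PySem.Int.ofChars? asc_chars).getD 0
      let value := dec_val - asc_val
      find_k_go fuel value (n + 1)

def find_k (val : Int) (n : Int) : Int := find_k_go 100 val n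

-- ===== PORT B =====
-- str.zfill(4): exact port for the sign-less decimal strings str(val) of the nonnegative val admitted by Pre_find_k
def zfill4 (cs : List Char) : List Char := List.replicate (4 - cs.length) '0' ++ cs

def kaprekarStep (val : Int) : Int :=
  let digits := PySem.List.sorted (zfill4 (PySem.Int.toChars val)) (fun c => c) false
  let small := (PySem.Int.ofChars? digits).getD 0      -- int(); ValueError only outside Pre_find_k
  let big := (PySem.Int.ofChars? digits.reverse).getD 0
  big - small

-- the while-loop, totalised by the same fuel guard; `count` is B's local step counter
def find_k_alt_loop : Nat → Int → Int → Int
  | 0, _, count => count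
  | fuel + 1, val, count =>
    if val = 6174 then count else find_k_alt_loop fuel (kaprekarStep val) (count + 1)

def find_k_alt (val : Int) (n : Int) : Int := n + find_k_alt_loop 100 val 0

-- ===== PRECONDITION & SPEC =====
-- Pre_ admits exactly the inputs on which A returns: 0 ≤ val ≤ 9999 with val not a multiple of
-- 1111.  Excluded are only inputs where A raises: negative val (int() ValueError on the sorted
-- string), the repdigits 0,1111,…,9999 (the routine loops at 0 forever: RecursionError), and
-- val > 9999 (a ≥5-digit value can only drop below 10000 to 9999 or 0, both repdigits, so 6174
-- is never reached: RecursionError).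
def Pre_find_k (val : Int) (n : Int) : Prop :=
  0 ≤ val ∧ val ≤ 9999 ∧ ¬ PySem.Int.mod val 1111 = 0
instance (val : Int) (n : Int) : Decidable (Pre_find_k val n) := by unfold Pre_find_k; infer_instance
def pvWitness_find_k : Int × Int := (1234, 0)

def Spec_find_k (val : Int) (n : Int) (out : Int) : Prop := out = find_k_alt val n
instance (val : Int) (n : Int) (out : Int) : Decidable (Spec_find_k val n out) := by unfold Spec_find_k; infer_instance

-- ===== CLAIM (what is proved, stated in full; the proofs are below) =====
def Claim_equal_find_k : Prop := ∀ (val : Int) (n : Int), Dom_find_k val n → Pre_find_k val n → Spec_find_k val n (find_k val n)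

-- ===== LEMMAS AND PROOFS =====

-- B's loop counter is a pure offset: running it from `count` is `count` plus running it from 0.
theorem find_k_alt_loop_shift (fuel : Nat) (val count : Int) :
    find_k_alt_loop fuel val count = count + find_k_alt_loop fuel val 0 := by
  induction fuel generalizing val count with
  | zero => simp [find_k_alt_loop]
  | succ fuel ih =>
    simp only [find_k_alt_loop]
    split
    · omega
    · rw [ih (kaprekarStep val) (count + 1), ih (kaprekarStep val) (0 + 1)]
      omega

-- A's accumulator recursion computes n plus B's loop count, for every fuel and every input
-- (the fuel-0 fallbacks agree as well), because A's one-step value is exactly kaprekarStep.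
theorem find_k_go_eq_loop (fuel : Nat) (val n : Int) :
    find_k_go fuel val n = n + find_k_alt_loop fuel val 0 := by
  induction fuel generalizing val n with
  | zero => simp [find_k_go, find_k_alt_loop]
  | succ fuel ih =>
    simp only [find_k_go, find_k_alt_loop]
    split
    · omega
    · rw [ih]
      rw [find_k_alt_loop_shift fuel (kaprekarStep val) (0 + 1)]
      have hstep :
          (PySem.Int.ofChars? ((PySem.List.slice?
              (PySem.List.sorted
                (List.replicate (4 - (PySem.Int.toChars val).length) '0' ++ PySem.Int.toChars val)
                (fun c => c) false) none none (-1)).getD [])).getD 0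
            - (PySem.Int.ofChars?
                (PySem.List.sorted
                  (List.replicate (4 - (PySem.Int.toChars val).length) '0' ++ PySem.Int.toChars val)
                  (fun c => c) false)).getD 0
          = kaprekarStep val := by
        simp [kaprekarStep, zfill4, PySem.List.slice?_none_none_neg_one]
      rw [hstep]
      omega

-- ===== VERDICT (by name: the statement is the Claim_ definition above) =====
theorem find_k_spec : Claim_equal_find_k := by
  intro val n _ _
  unfold Spec_find_k find_k find_k_alt
  exact find_k_go_eq_loop 100 val n
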